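-- pv_equiv track=rewrite | github.com/Luispmv/Ejercicios-con-Python | practica5.py | total_repetidos
-- ===== SOURCE A (Python) =====
-- def total_repetidos(lista):
--     repetidos = []
--     elementos_repetidos = []
--     contador = 0
--     for sublista in lista:
--         for item in sublista:
--            if sublista.count(item) >1:
--                 repetidos.append(item)
--                 contador = len(repetidos)
--
--     for item in repetidos:
--         if repetidos.count(item) > 1 and item not in elementos_repetidos:
--             elementos_repetidos.append(item)
--     return f"En la lista {lista} los elementos repetidos son: {elementos_repetidos} ya que aparecen {contador} veces"
-- ===== SOURCE B (Python) =====
-- def total_repetidos(lista):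
--     contador = 0
--     elementos_repetidos = []
--     seen = set()
--     for sublista in lista:
--         counts = {}
--         for item in sublista:
--             counts[item] = counts.get(item, 0) + 1
--         for item in sublista:
--             if counts[item] > 1:
--                 contador += 1
--                 if item not in seen:
--                     seen.add(item)
--                     elementos_repetidos.append(item)
--     return f"En la lista {lista} los elementos repetidos son: {elementos_repetidos} ya que aparecen {contador} veces"
-- ===== Notes on version B (the rewrite author's own statement) =====
-- stated objective: faster
-- what changed: Replaces A's two-phase build-then-rescan (collect a 'repetidos' multiset via repeated sublist.count scans, then rescan it with repetidos.count to dedup) by a single traversal that builds a per-sublist count dictionary once and accumulates the total and the first-seen repeated elements with a 'seen' set.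
import Mathlib
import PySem

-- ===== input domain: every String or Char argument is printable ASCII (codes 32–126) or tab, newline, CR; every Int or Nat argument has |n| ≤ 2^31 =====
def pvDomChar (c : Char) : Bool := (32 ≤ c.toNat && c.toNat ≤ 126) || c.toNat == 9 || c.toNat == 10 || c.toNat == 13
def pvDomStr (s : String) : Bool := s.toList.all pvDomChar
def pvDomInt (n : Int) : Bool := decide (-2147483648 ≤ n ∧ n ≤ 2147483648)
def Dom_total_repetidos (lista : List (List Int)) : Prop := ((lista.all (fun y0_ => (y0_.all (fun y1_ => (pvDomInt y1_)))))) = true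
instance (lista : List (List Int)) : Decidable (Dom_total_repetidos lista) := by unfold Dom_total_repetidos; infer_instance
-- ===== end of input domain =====

-- B replaces A's build-then-rescan two-phase shape (quadratic inner .count scans plus a second
-- pass over the collected multiset) by a single accumulating traversal with a per-sublist count
-- dictionary and a 'seen' set; objective: faster (removes the repeated .count scans).

-- shared formatting helper: Python's repr of a list of ints / of a list of lists of ints
def pyReprIntList (xs : List Int) : String :=
  "[" ++ PySem.Str.join ", " (xs.map PySem.Int.toStr) ++ "]"
def pyReprIntListList (xss : List (List Int)) : String :=
  "[" ++ PySem.Str.join ", " (xss.map pyReprIntList) ++ "]"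

-- ===== PORT A =====
def total_repetidos (lista : List (List Int)) : String :=
  let st := lista.foldl
    (fun (st : List Int × Int) sublista =>
      sublista.foldl
        (fun (st : List Int × Int) item =>
          if 1 < PySem.List.count sublista item then
            (st.1 ++ [item], ((st.1 ++ [item]).length : Int))
          else st) st)
    ([], 0)
  let repetidos := st.1
  let contador := st.2
  let elementos_repetidos := repetidos.foldl
    (fun acc item =>
      if 1 < PySem.List.count repetidos item ∧ ¬ item ∈ acc then acc ++ [item] else acc) []
  "En la lista " ++ pyReprIntListList lista ++ " los elementos repetidos son: " ++
    pyReprIntList elementos_repetidos ++ " ya que aparecen " ++ PySem.Int.toStr contador ++ " veces"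

-- ===== PORT B =====
def total_repetidos_alt (lista : List (List Int)) : String :=
  let st := lista.foldl
    (fun (st : Int × List Int × PySem.Set Int) sublista =>
      let counts := sublista.foldl
        (fun (d : PySem.Dict Int Int) item => d.insert item (d.getD item 0 + 1)) PySem.Dict.empty
      sublista.foldl
        (fun (st : Int × List Int × PySem.Set Int) item =>
          if 1 < counts.getD item 0 then
            let c := st.1 + 1
            if PySem.Set.contains st.2.2 item then (c, st.2.1, st.2.2)
            else (c, st.2.1 ++ [item], PySem.Set.add st.2.2 item)
          else st) st)
    (0, [], PySem.Set.empty)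
  "En la lista " ++ pyReprIntListList lista ++ " los elementos repetidos son: " ++
    pyReprIntList st.2.1 ++ " ya que aparecen " ++ PySem.Int.toStr st.1 ++ " veces"

-- ===== PRECONDITION & SPEC =====
def Spec_total_repetidos (lista : List (List Int)) (out : String) : Prop := out = total_repetidos_alt lista
instance (lista : List (List Int)) (out : String) : Decidable (Spec_total_repetidos lista out) := by unfold Spec_total_repetidos; infer_instance

-- ===== CLAIM (what is proved, stated in full; the proofs are below) =====
def Claim_equal_total_repetidos : Prop := ∀ (lista : List (List Int)), Dom_total_repetidos lista → Spec_total_repetidos lista (total_repetidos lista)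

-- ===== LEMMAS AND PROOFS =====

-- the multiset A collects in its first phase ("repetidos")
def repSpec (l : List (List Int)) : List Int :=
  l.flatMap (fun s => s.filter (fun x => decide (1 < PySem.List.count s x)))

-- A's inner loop: appends the sub-filter and keeps contador = length of repetidos
theorem A_inner (l : List Int) (p : Int → Prop) [DecidablePred p] (r : List Int) :
    l.foldl (fun (st : List Int × Int) item =>
        if p item then (st.1 ++ [item], ((st.1 ++ [item]).length : Int)) else st)
      (r, (r.length : Int))
    = (r ++ l.filter (fun x => decide (p x)),
       ((r ++ l.filter (fun x => decide (p x))).length : Int)) := by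
  induction l generalizing r with
  | nil => simp
  | cons a t ih =>
    by_cases hp : p a
    · simpa [hp] using ih (r ++ [a])
    · simpa [hp] using ih r

-- A's outer loop
theorem A_outer (ls : List (List Int)) (r : List Int) :
    ls.foldl (fun (st : List Int × Int) sublista =>
        sublista.foldl (fun (st : List Int × Int) item =>
            if 1 < PySem.List.count sublista item then
              (st.1 ++ [item], ((st.1 ++ [item]).length : Int))
            else st) st)
      (r, (r.length : Int))
    = (r ++ repSpec ls, ((r ++ repSpec ls).length : Int)) := by
  induction ls generalizing r with
  | nil => simp [repSpec]
  | cons s t ih =>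
    simp only [List.foldl_cons]
    rw [A_inner s (fun x => 1 < PySem.List.count s x) r, ih]
    simp [repSpec, List.append_assoc]

-- every element of repSpec occurs at least twice in it
theorem repSpec_guard (l : List (List Int)) (x : Int) (hx : x ∈ repSpec l) :
    1 < PySem.List.count (repSpec l) x := by
  simp only [repSpec, List.mem_flatMap] at hx
  obtain ⟨s, hs, hxf⟩ := hx
  have hxs := List.mem_filter.mp hxf
  have hsub : (s.filter (fun y => decide (1 < PySem.List.count s y))).Sublist (repSpec l) := by
    have : (s.filter (fun y => decide (1 < PySem.List.count s y))) ∈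
        l.map (fun s => s.filter (fun y => decide (1 < PySem.List.count s y))) :=
      List.mem_map_of_mem hs
    simpa [repSpec, List.flatMap_def] using List.sublist_flatten_of_mem this
  have hcf : List.count x (s.filter (fun y => decide (1 < PySem.List.count s y))) = List.count x s :=
    List.count_filter hxs.2
  have hle := hsub.count_le x
  have hps : 1 < List.count x s := by
    have := of_decide_eq_true hxs.2
    simpa [PySem.List.count_eq] using this
  simp only [PySem.List.count_eq, List.count_eq_countP] at *
  omega

-- A's second pass is ordered dedup (Set.ofList) of repetidos
theorem A_second (l : List (List Int)) :
    (repSpec l).foldl (fun acc item =>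
        if 1 < PySem.List.count (repSpec l) item ∧ ¬ item ∈ acc then acc ++ [item] else acc) []
    = PySem.Set.ofList (repSpec l) := by
  rw [PySem.Set.ofList_eq_foldl]
  apply PySem.List.foldl_congr_mem
  intro acc x hx
  have hg := repSpec_guard l x hx
  by_cases hmem : x ∈ acc
  · simp [hmem, PySem.Set.add, PySem.Set.contains]
  · have hg' : 1 < List.count x (repSpec l) := by simpa [PySem.List.count_eq] using hg
    simp [hmem, PySem.Set.add, PySem.Set.contains, hg']

-- B's count dictionary agrees with .count
theorem B_counts (s : List Int) (x : Int) :
    (s.foldl (fun (d : PySem.Dict Int Int) item => d.insert item (d.getD item 0 + 1))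
        PySem.Dict.empty).getD x 0 = (PySem.List.count s x : Int) := by
  rw [PySem.Dict.getD_foldl_insert_add_one]
  simp [PySem.List.count_eq]

-- B's inner loop, with the invariant seen = elementos (same list)
theorem B_inner (l : List Int) (p : Int → Prop) [DecidablePred p] (c : Int) (el : List Int) :
    l.foldl (fun (st : Int × List Int × PySem.Set Int) item =>
        if p item then
          let c' := st.1 + 1
          if PySem.Set.contains st.2.2 item then (c', st.2.1, st.2.2)
          else (c', st.2.1 ++ [item], PySem.Set.add st.2.2 item)
        else st) (c, el, el)
    = (c + ((l.filter (fun x => decide (p x))).length : Int),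
       PySem.Set.update el (l.filter (fun x => decide (p x))),
       PySem.Set.update el (l.filter (fun x => decide (p x)))) := by
  induction l generalizing c el with
  | nil => simp [PySem.Set.update]
  | cons a t ih =>
    simp only [List.foldl_cons, List.filter_cons]
    by_cases hp : p a
    · simp only [hp, if_pos, decide_true]
      by_cases hmem : a ∈ el
      · have h1 : PySem.Set.contains el a = true := by simp [PySem.Set.contains, hmem]
        have h2 : PySem.Set.add el a = el := by simp [PySem.Set.add, PySem.Set.contains, hmem]
        rw [show (if PySem.Set.contains el a then ((c + 1 : Int), el, el)
              else (c + 1, el ++ [a], PySem.Set.add el a)) = (c + 1, el, el) by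
              simp [PySem.Set.contains, hmem]]
        rw [ih (c + 1) el]
        simp only [PySem.Set.update, List.foldl_cons, h2, List.length_cons]
        refine Prod.ext ?_ rfl
        push_cast
        ring
      · have h1 : PySem.Set.contains el a = false := by simp [PySem.Set.contains, hmem]
        have h2 : PySem.Set.add el a = el ++ [a] := by simp [PySem.Set.add, PySem.Set.contains, hmem]
        rw [show (if PySem.Set.contains el a then ((c + 1 : Int), el, el)
              else (c + 1, el ++ [a], PySem.Set.add el a)) = (c + 1, el ++ [a], el ++ [a]) by
              simp [PySem.Set.contains, PySem.Set.add, hmem]]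
        rw [ih (c + 1) (el ++ [a])]
        simp only [PySem.Set.update, List.foldl_cons, h2, List.length_cons]
        refine Prod.ext ?_ rfl
        push_cast
        ring
    · rw [if_neg hp, if_neg (by simpa using hp)]
      exact ih c el

-- B's inner loop with the dictionary condition equals the .count condition
theorem B_inner_counts (s : List Int) (c : Int) (el : List Int) :
    (s.foldl (fun (st : Int × List Int × PySem.Set Int) item =>
        if 1 < (s.foldl (fun (d : PySem.Dict Int Int) item => d.insert item (d.getD item 0 + 1))
            PySem.Dict.empty).getD item 0 then
          let c' := st.1 + 1
          if PySem.Set.contains st.2.2 item then (c', st.2.1, st.2.2)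
          else (c', st.2.1 ++ [item], PySem.Set.add st.2.2 item)
        else st) (c, el, el))
    = (c + ((s.filter (fun x => decide (1 < PySem.List.count s x))).length : Int),
       PySem.Set.update el (s.filter (fun x => decide (1 < PySem.List.count s x))),
       PySem.Set.update el (s.filter (fun x => decide (1 < PySem.List.count s x)))) := by
  have hc : ∀ (st : Int × List Int × PySem.Set Int) (x : Int), x ∈ s →
      (fun (st : Int × List Int × PySem.Set Int) item =>
        if 1 < (s.foldl (fun (d : PySem.Dict Int Int) item => d.insert item (d.getD item 0 + 1))
            PySem.Dict.empty).getD item 0 then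
          let c' := st.1 + 1
          if PySem.Set.contains st.2.2 item then (c', st.2.1, st.2.2)
          else (c', st.2.1 ++ [item], PySem.Set.add st.2.2 item)
        else st) st x
      = (fun (st : Int × List Int × PySem.Set Int) item =>
        if 1 < PySem.List.count s item then
          let c' := st.1 + 1
          if PySem.Set.contains st.2.2 item then (c', st.2.1, st.2.2)
          else (c', st.2.1 ++ [item], PySem.Set.add st.2.2 item)
        else st) st x := by
    intro st x _
    dsimp only
    rw [B_counts s x]
    by_cases h : 1 < PySem.List.count s x
    · have h' : (1 : Int) < (PySem.List.count s x : Int) := by exact_mod_cast h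
      rw [if_pos h', if_pos h]
    · have h' : ¬ (1 : Int) < (PySem.List.count s x : Int) := by exact_mod_cast h
      rw [if_neg h', if_neg h]
  refine Eq.trans (PySem.List.foldl_congr_mem _ _ _ _ hc) ?_
  exact B_inner s (fun x => 1 < PySem.List.count s x) c el

-- B's outer loop
theorem B_outer (ls : List (List Int)) (c : Int) (el : List Int) :
    ls.foldl (fun (st : Int × List Int × PySem.Set Int) sublista =>
        let counts := sublista.foldl
          (fun (d : PySem.Dict Int Int) item => d.insert item (d.getD item 0 + 1)) PySem.Dict.empty
        sublista.foldl (fun (st : Int × List Int × PySem.Set Int) item =>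
            if 1 < counts.getD item 0 then
              let c' := st.1 + 1
              if PySem.Set.contains st.2.2 item then (c', st.2.1, st.2.2)
              else (c', st.2.1 ++ [item], PySem.Set.add st.2.2 item)
            else st) st) (c, el, el)
    = (c + ((repSpec ls).length : Int),
       PySem.Set.update el (repSpec ls), PySem.Set.update el (repSpec ls)) := by
  induction ls generalizing c el with
  | nil => simp [repSpec, PySem.Set.update]
  | cons s t ih =>
    simp only [List.foldl_cons]
    rw [B_inner_counts s c el]
    rw [ih]
    simp [repSpec, PySem.Set.update, List.foldl_append]
    omega

-- the two outer loops from their actual initial states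
theorem A_outer0 (ls : List (List Int)) :
    ls.foldl (fun (st : List Int × Int) sublista =>
        sublista.foldl (fun (st : List Int × Int) item =>
            if 1 < PySem.List.count sublista item then
              (st.1 ++ [item], ((st.1 ++ [item]).length : Int))
            else st) st)
      ([], 0)
    = (repSpec ls, ((repSpec ls).length : Int)) := by
  have h := A_outer ls []
  simpa using h

theorem B_outer0 (ls : List (List Int)) :
    ls.foldl (fun (st : Int × List Int × PySem.Set Int) sublista =>
        let counts := sublista.foldl
          (fun (d : PySem.Dict Int Int) item => d.insert item (d.getD item 0 + 1)) PySem.Dict.empty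
        sublista.foldl (fun (st : Int × List Int × PySem.Set Int) item =>
            if 1 < counts.getD item 0 then
              let c := st.1 + 1
              if PySem.Set.contains st.2.2 item then (c, st.2.1, st.2.2)
              else (c, st.2.1 ++ [item], PySem.Set.add st.2.2 item)
            else st) st) (0, [], PySem.Set.empty)
    = (((repSpec ls).length : Int),
       PySem.Set.ofList (repSpec ls), PySem.Set.ofList (repSpec ls)) := by
  have h := B_outer ls 0 []
  rw [PySem.Set.ofList_eq_foldl]
  simpa [PySem.Set.empty, PySem.Set.update] using h

-- ===== VERDICT (by name: the statement is the Claim_ definition above) =====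
theorem total_repetidos_spec : Claim_equal_total_repetidos := by
  intro lista _
  unfold Spec_total_repetidos
  simp only [total_repetidos, total_repetidos_alt, A_outer0, B_outer0, A_second]
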